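-- pv_equiv track=rewrite | github.com/hbkim0/NHN-diquest | Style-profiling-pipeline/tools/registerer-mlp/koelectra-base/preprocessing/preprocess.py | match_category_to_sentences
-- ===== SOURCE A (Python) =====
-- def match_category_to_sentences(sentences, category):# list of list of tuples(word, tag)
--     entry_list = sorted(list(category.keys()), key=lambda x: len(x), reverse=True)
--     new_sentences = []
--     for sentence in sentences:
--         tmp = []
--         splited_sentence = sentence.split(' ')
--         already_tagged = False # 2 단어짜리 entry 처리를 위한 flag
--         for i, word in enumerate(splited_sentence):
--             if already_tagged is True:
--                 already_tagged = False
--                 continue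
--             for entry in entry_list:
--                 if ' ' not in entry:
--                     if entry in word:
--                         tmp.append((word, category[entry]+'_B'))
--                         break
--                 else: # 공백 포함된 entry의 _B 부분과 _I 부분을 처리하는 방법이 달라야한다.
--                     if i < len(splited_sentence)-1:
--                         if word == entry.split(' ')[0] and entry.split(' ')[1] in splited_sentence[i+1]:
--                             tmp.append((word, category[entry]+'_B'))
--                             tmp.append((splited_sentence[i+1], category[entry]+'_I'))
--                             already_tagged = True
--                             break
--             else:
--                 tmp.append((word, 'O'))
--         new_sentences.append(tmp)
--
--     return new_sentences
-- ===== SOURCE B (Python) =====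
-- def match_category_to_sentences(sentences, category):
--     # Parse every entry once (length, pair?, first word, second word, tag),
--     # then pick the best match per word by a single best-tracking scan
--     # (max length, first-inserted wins ties) instead of sorting the keys.
--     parsed = []
--     for entry, tag in category.items():
--         if ' ' in entry:
--             parts = entry.split(' ')
--             parsed.append((len(entry), True, parts[0], parts[1], tag))
--         else:
--             parsed.append((len(entry), False, entry, '', tag))
--     result = []
--     for sentence in sentences:
--         words = sentence.split(' ')
--         n = len(words)
--         tagged = []
--         i = 0
--         while i < n:
--             word = words[i]
--             best = None  # (length, pair?, tag)
--             for (L, is_pair, first, second, tag) in parsed: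
--                 if best is None or L > best[0]:
--                     if is_pair:
--                         if i < n - 1 and word == first and second in words[i + 1]:
--                             best = (L, True, tag)
--                     elif first in word:
--                         best = (L, False, tag)
--             if best is None:
--                 tagged.append((word, 'O'))
--                 i += 1
--             elif best[1]:
--                 tagged.append((word, best[2] + '_B'))
--                 tagged.append((words[i + 1], best[2] + '_I'))
--                 i += 2
--             else:
--                 tagged.append((word, best[2] + '_B'))
--                 i += 1
--         result.append(tagged)
--     return result
-- ===== Notes on version B (the rewrite author's own statement) =====
-- stated objective: alternative
-- what changed: B drops A's length-descending sort of the keys and A's per-word re-splitting of two-word entries: entries are parsed once into (length, pair?, first, second, tag) tuples, and each word picks its match by a single best-tracking scan (strictly longer entry wins, first-inserted wins ties), with an index-advancing while loop (i += 2 on a pair match) instead of A's already_tagged flag.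
import Mathlib
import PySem

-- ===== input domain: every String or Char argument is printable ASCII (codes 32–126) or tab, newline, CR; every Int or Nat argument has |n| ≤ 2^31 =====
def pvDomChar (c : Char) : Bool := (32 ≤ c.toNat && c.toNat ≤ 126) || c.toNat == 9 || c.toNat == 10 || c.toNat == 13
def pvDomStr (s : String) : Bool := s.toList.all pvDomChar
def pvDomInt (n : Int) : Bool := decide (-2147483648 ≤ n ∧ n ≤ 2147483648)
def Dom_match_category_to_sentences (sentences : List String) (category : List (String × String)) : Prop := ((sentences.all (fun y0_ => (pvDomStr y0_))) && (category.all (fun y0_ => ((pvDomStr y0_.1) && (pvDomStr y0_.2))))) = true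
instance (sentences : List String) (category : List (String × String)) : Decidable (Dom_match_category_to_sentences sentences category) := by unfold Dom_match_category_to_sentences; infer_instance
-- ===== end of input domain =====

-- B replaces A's length-descending sort of the keys by a single best-tracking scan over
-- entries parsed once, and the already_tagged flag by an index-advancing loop (alternative
-- decomposition, same observable result).
-- The dict argument `category` is modelled as PySem.Dict.ofList category in both ports.

-- ===== PORT A =====
-- inner `for entry in entry_list: … else: tmp.append((word,'O'))` loop of A;
-- returns (items appended to tmp, already_tagged). Indexing splited_sentence[i+1] and
-- entry.split(' ')[0/1] is always in range in A, so pyGetD is exact here.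
def aEntryLoop (d : PySem.Dict String String) (ws : List String) (i : Int) (word : String) :
    List String → List (String × String) × Bool
  | [] => ([(word, "O")], false)
  | entry :: rest =>
    if !(PySem.Str.isIn " " entry) then
      if PySem.Str.isIn entry word then ([(word, d.getD entry "" ++ "_B")], false)
      else aEntryLoop d ws i word rest
    else
      if i < (ws.length : Int) - 1 then
        if word == PySem.List.pyGetD ((PySem.Str.split? entry " ").getD []) 0 "" &&
            PySem.Str.isIn (PySem.List.pyGetD ((PySem.Str.split? entry " ").getD []) 1 "")
              (PySem.List.pyGetD ws (i + 1) "") then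
          ([(word, d.getD entry "" ++ "_B"),
            (PySem.List.pyGetD ws (i + 1) "", d.getD entry "" ++ "_I")], true)
        else aEntryLoop d ws i word rest
      else aEntryLoop d ws i word rest

-- `for i, word in enumerate(splited_sentence)` with the already_tagged flag
def aWordLoop (d : PySem.Dict String String) (ws : List String) (entryList : List String) :
    List (Int × String) → Bool → List (String × String)
  | [], _ => []
  | (i, word) :: rest, flag =>
    if flag then aWordLoop d ws entryList rest false
    else
      let r := aEntryLoop d ws i word entryList
      r.1 ++ aWordLoop d ws entryList rest r.2

def match_category_to_sentences (sentences : List String) (category : List (String × String)) :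
    List (List (String × String)) :=
  let d := PySem.Dict.ofList category
  let entryList := PySem.List.sorted d.keys (fun x => PySem.Str.len x) true
  sentences.map (fun sentence =>
    let ws := (PySem.Str.split? sentence " ").getD []
    aWordLoop d ws entryList (PySem.List.enumerate ws) false)

-- ===== PORT B =====
-- parse one dict item into (length, pair?, first, second, tag)
def bParse (kv : String × String) : Int × Bool × String × String × String :=
  if PySem.Str.isIn " " kv.1 then
    (PySem.Str.len kv.1, true,
     PySem.List.pyGetD ((PySem.Str.split? kv.1 " ").getD []) 0 "",
     PySem.List.pyGetD ((PySem.Str.split? kv.1 " ").getD []) 1 "", kv.2)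
  else
    (PySem.Str.len kv.1, false, kv.1, "", kv.2)

-- best-tracking scan over the parsed entries for the word at position i
def bBest (ws : List String) (i : Int) (word : String) :
    List (Int × Bool × String × String × String) → Option (Int × Bool × String) →
      Option (Int × Bool × String)
  | [], best => best
  | (L, isPair, first, second, tag) :: rest, best =>
    bBest ws i word rest
      (if (match best with | none => true | some b => decide (b.1 < L)) then
        if isPair then
          (if decide (i < (ws.length : Int) - 1) && word == first &&
              PySem.Str.isIn second (PySem.List.pyGetD ws (i + 1) "") then
            some (L, true, tag)
          else best)
        else (if PySem.Str.isIn first word then some (L, false, tag) else best)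
      else best)

-- the `while i < n` loop; advances by 2 after a pair match
def bWordLoop (parsed : List (Int × Bool × String × String × String)) (ws : List String)
    (i : Nat) : List (String × String) :=
  if h : i < ws.length then
    match bBest ws (i : Int) ws[i] parsed none with
    | none => (ws[i], "O") :: bWordLoop parsed ws (i + 1)
    | some (_, false, tag) => (ws[i], tag ++ "_B") :: bWordLoop parsed ws (i + 1)
    | some (_, true, tag) =>
        (ws[i], tag ++ "_B") :: (PySem.List.pyGetD ws ((i : Int) + 1) "", tag ++ "_I") ::
          bWordLoop parsed ws (i + 2)
  else []
termination_by ws.length - i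

def match_category_to_sentences_alt (sentences : List String) (category : List (String × String)) :
    List (List (String × String)) :=
  let parsed := (PySem.Dict.ofList category).items.map bParse
  sentences.map (fun sentence =>
    bWordLoop parsed ((PySem.Str.split? sentence " ").getD []) 0)

-- ===== PRECONDITION & SPEC =====
def Spec_match_category_to_sentences (sentences : List String) (category : List (String × String)) (out : List (List (String × String))) : Prop := out = match_category_to_sentences_alt sentences category
instance (sentences : List String) (category : List (String × String)) (out : List (List (String × String))) : Decidable (Spec_match_category_to_sentences sentences category out) := by unfold Spec_match_category_to_sentences; infer_instance

-- ===== CLAIM (what is proved, stated in full; the proofs are below) =====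
def Claim_equal_match_category_to_sentences : Prop := ∀ (sentences : List String) (category : List (String × String)), Dom_match_category_to_sentences sentences category → Spec_match_category_to_sentences sentences category (match_category_to_sentences sentences category)

-- ===== LEMMAS AND PROOFS =====

-- whether entry matches the word at position i (the condition A tests, as one predicate)
def predM (ws : List String) (i : Int) (word : String) (entry : String) : Bool :=
  if PySem.Str.isIn " " entry then
    decide (i < (ws.length : Int) - 1) &&
      (word == PySem.List.pyGetD ((PySem.Str.split? entry " ").getD []) 0 "") &&
      PySem.Str.isIn (PySem.List.pyGetD ((PySem.Str.split? entry " ").getD []) 1 "")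
        (PySem.List.pyGetD ws (i + 1) "")
  else PySem.Str.isIn entry word

-- what A appends for the chosen entry (or none)
def renderA (d : PySem.Dict String String) (ws : List String) (i : Int) (word : String) :
    Option String → List (String × String) × Bool
  | none => ([(word, "O")], false)
  | some e =>
    if PySem.Str.isIn " " e then
      ([(word, d.getD e "" ++ "_B"),
        (PySem.List.pyGetD ws (i + 1) "", d.getD e "" ++ "_I")], true)
    else ([(word, d.getD e "" ++ "_B")], false)

-- the best-so-far update both sides compute, at the level of entry strings
def updK (p : String → Bool) (b : Option String) (x : String) : Option String :=
  if (match b with | none => true | some m => decide (PySem.Str.len m < PySem.Str.len x)) then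
    (if p x then some x else b)
  else b

def bestK (p : String → Bool) : List String → Option String → Option String
  | [], b => b
  | x :: rest, b => bestK p rest (updK p b x)

def projK (d : PySem.Dict String String) (e : String) : Int × Bool × String :=
  (PySem.Str.len e, PySem.Str.isIn " " e, d.getD e "")

theorem updK_none (p : String → Bool) (x : String) :
    updK p none x = (if p x then some x else none) := rfl

theorem updK_some (p : String → Bool) (m x : String) :
    updK p (some m) x =
      (if decide (PySem.Str.len m < PySem.Str.len x) = true then
        (if p x then some x else some m) else some m) := rfl

theorem upd_map (d : PySem.Dict String String) (p : String → Bool) (x : String)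
    (b : Option String) (v : Int × Bool × String) (hv : projK d x = v) :
    (if (match b with
          | none => true
          | some m => decide (PySem.Str.len m < PySem.Str.len x)) = true then
       (if p x = true then some v else b.map (projK d))
     else b.map (projK d))
      = (updK p b x).map (projK d) := by
  cases b with
  | none =>
    rw [updK_none]
    cases hp : p x
    · simp
    · simp [← hv]
  | some m =>
    rw [updK_some]
    have hmatch : (match (some m : Option String) with
        | none => true
        | some mm => decide (PySem.Str.len mm < PySem.Str.len x))
        = decide (PySem.Str.len m < PySem.Str.len x) := rfl
    rw [hmatch]
    cases hL : decide (PySem.Str.len m < PySem.Str.len x)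
    · simp
    · cases hp : p x
      · simp
      · simp [← hv]

theorem aEntryLoop_eq (d : PySem.Dict String String) (ws : List String) (i : Int)
    (word : String) (el : List String) :
    aEntryLoop d ws i word el = renderA d ws i word (el.find? (predM ws i word)) := by
  induction el with
  | nil => rfl
  | cons entry rest ih =>
    by_cases hp : predM ws i word entry = true
    · rw [List.find?_cons_of_pos hp]
      unfold predM at hp
      by_cases hs : PySem.Str.isIn " " entry = true
      · have hs' : PySem.Chars.isIn [' '] entry.toList = true := by simpa using hs
        simp only [if_pos hs, Bool.and_eq_true, decide_eq_true_eq] at hp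
        have h2' : PySem.Chars.isIn
            (PySem.List.pyGetD ((PySem.Str.split? entry " ").getD []) 1 "").toList
            (PySem.List.pyGetD ws (i + 1) "").toList = true := by simpa using hp.2
        simp [aEntryLoop, renderA, hs', hp.1.1, hp.1.2, h2']
      · have hs' : PySem.Chars.isIn [' '] entry.toList = false := by simpa using hs
        simp only [if_neg hs] at hp
        have hp' : PySem.Chars.isIn entry.toList word.toList = true := by simpa using hp
        simp [aEntryLoop, renderA, hs', hp']
    · rw [List.find?_cons_of_neg (by simpa using hp)]
      unfold predM at hp
      by_cases hs : PySem.Str.isIn " " entry = true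
      · have hs' : PySem.Chars.isIn [' '] entry.toList = true := by simpa using hs
        simp only [if_pos hs, Bool.and_eq_true, decide_eq_true_eq, not_and] at hp
        by_cases hi : i < (ws.length : Int) - 1
        · have hcond : ((word == PySem.List.pyGetD ((PySem.Str.split? entry " ").getD []) 0 "") &&
              PySem.Str.isIn (PySem.List.pyGetD ((PySem.Str.split? entry " ").getD []) 1 "")
                (PySem.List.pyGetD ws (i + 1) "")) = false := by
            cases hA : (word == PySem.List.pyGetD ((PySem.Str.split? entry " ").getD []) 0 "") with
            | false => simp
            | true =>
              have := hp ⟨hi, hA⟩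
              simp only [Bool.not_eq_true] at this
              simp only [Bool.true_and]
              simpa using this
          simp only [aEntryLoop, hs, Bool.not_true, Bool.false_eq_true, if_false, if_pos hi,
            hcond, ih]
        · simp [aEntryLoop, hs', hi, ih]
      · have hs' : PySem.Chars.isIn [' '] entry.toList = false := by simpa using hs
        simp only [if_neg hs] at hp
        have hp' : PySem.Chars.isIn entry.toList word.toList = false := by simpa using hp
        simp [aEntryLoop, hs', hp', ih]

theorem insertBy_pairwise (x : String) (acc : List String)
    (h : acc.Pairwise (fun a b => PySem.Str.len b ≤ PySem.Str.len a)) :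
    (PySem.List.insertBy (fun a b => decide (PySem.Str.len b < PySem.Str.len a)) x acc).Pairwise
      (fun a b => PySem.Str.len b ≤ PySem.Str.len a) := by
  induction acc with
  | nil => simp [PySem.List.insertBy]
  | cons y ys ih =>
    rw [List.pairwise_cons] at h
    by_cases hb : PySem.Str.len y < PySem.Str.len x
    · simp only [PySem.List.insertBy, hb, decide_true, if_true]
      constructor
      · intro z hz
        rcases List.mem_cons.mp hz with rfl | hz
        · exact le_of_lt hb
        · exact le_trans (h.1 z hz) (le_of_lt hb)
      · exact List.pairwise_cons.mpr h
    · simp only [PySem.List.insertBy, hb, decide_false, Bool.false_eq_true, if_false]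
      constructor
      · intro z hz
        rcases (PySem.List.mem_insertBy _ _ _ _).mp hz with rfl | hz
        · omega
        · exact h.1 z hz
      · exact ih h.2

theorem find?_insertBy (p : String → Bool) (x : String) (acc : List String)
    (h : acc.Pairwise (fun a b => PySem.Str.len b ≤ PySem.Str.len a)) :
    (PySem.List.insertBy (fun a b => decide (PySem.Str.len b < PySem.Str.len a)) x acc).find? p
      = updK p (acc.find? p) x := by
  induction acc with
  | nil => by_cases hp : p x = true <;> simp [PySem.List.insertBy, hp, updK_none]
  | cons y ys ih =>
    rw [List.pairwise_cons] at h
    have hstep : PySem.List.insertBy (fun a b => decide (PySem.Str.len b < PySem.Str.len a)) x (y :: ys)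
        = if decide (PySem.Str.len y < PySem.Str.len x) = true then x :: y :: ys
          else y :: PySem.List.insertBy (fun a b => decide (PySem.Str.len b < PySem.Str.len a)) x ys := rfl
    cases hb : decide (PySem.Str.len y < PySem.Str.len x) with
    | true =>
      have hxy : PySem.Str.len y < PySem.Str.len x := of_decide_eq_true hb
      rw [hstep, hb, if_pos rfl]
      cases hfb : (y :: ys).find? p with
      | none =>
        rw [updK_none]
        by_cases hpx : p x = true
        · rw [List.find?_cons_of_pos hpx, if_pos hpx]
        · rw [List.find?_cons_of_neg (by simpa using hpx), if_neg hpx, hfb]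
      | some m =>
        have hmem : m ∈ y :: ys := List.mem_of_find?_eq_some hfb
        have hlen : PySem.Str.len m < PySem.Str.len x := by
          rcases List.mem_cons.mp hmem with rfl | hm
          · exact hxy
          · exact lt_of_le_of_lt (h.1 m hm) hxy
        rw [updK_some, if_pos (by simpa using hlen)]
        by_cases hpx : p x = true
        · rw [List.find?_cons_of_pos hpx, if_pos hpx]
        · rw [List.find?_cons_of_neg (by simpa using hpx), if_neg hpx, hfb]
    | false =>
      rw [hstep, hb]
      simp only [Bool.false_eq_true, if_false]
      by_cases hpy : p y = true
      · rw [List.find?_cons_of_pos hpy, List.find?_cons_of_pos hpy, updK_some]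
        simp only [hb, Bool.false_eq_true, if_false]
      · rw [List.find?_cons_of_neg (by simpa using hpy),
          List.find?_cons_of_neg (by simpa using hpy), ih h.2]

theorem find?_foldl_insertBy (p : String → Bool) (xs acc : List String)
    (h : acc.Pairwise (fun a b => PySem.Str.len b ≤ PySem.Str.len a)) :
    ((xs.foldl (fun a x =>
        PySem.List.insertBy (fun a b => decide (PySem.Str.len b < PySem.Str.len a)) x a) acc).find? p)
      = bestK p xs (acc.find? p) := by
  induction xs generalizing acc with
  | nil => rfl
  | cons x rest ih =>
    simp only [List.foldl_cons, bestK]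
    rw [ih _ (insertBy_pairwise x acc h), find?_insertBy p x acc h]

theorem find?_sorted_rev (p : String → Bool) (xs : List String) :
    (PySem.List.sorted xs (fun x => PySem.Str.len x) true).find? p = bestK p xs none := by
  rw [PySem.List.sorted_rev_eq_foldl_insertBy]
  simpa using find?_foldl_insertBy p xs [] List.Pairwise.nil

theorem bBest_eq (d : PySem.Dict String String) (ws : List String) (i : Int) (word : String)
    (xs : List String) (b : Option String) :
    bBest ws i word (xs.map (fun k => bParse (k, d.getD k ""))) (b.map (projK d))
      = (bestK (predM ws i word) xs b).map (projK d) := by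
  induction xs generalizing b with
  | nil => rfl
  | cons x rest ih =>
    rw [List.map_cons]
    have hguard :
        (match b.map (projK d) with | none => true | some bb => decide (bb.1 < PySem.Str.len x))
          = (match b with | none => true | some m => decide (PySem.Str.len m < PySem.Str.len x)) := by
      cases b <;> rfl
    by_cases hs : PySem.Str.isIn " " x = true
    · have hfx : bParse (x, d.getD x "") = (PySem.Str.len x, true,
          PySem.List.pyGetD ((PySem.Str.split? x " ").getD []) 0 "",
          PySem.List.pyGetD ((PySem.Str.split? x " ").getD []) 1 "", d.getD x "") := by
        unfold bParse; rw [if_pos hs]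
      have hcond : (decide (i < (ws.length : Int) - 1) &&
          (word == PySem.List.pyGetD ((PySem.Str.split? x " ").getD []) 0 "") &&
          PySem.Str.isIn (PySem.List.pyGetD ((PySem.Str.split? x " ").getD []) 1 "")
            (PySem.List.pyGetD ws (i + 1) "")) = predM ws i word x := by
        unfold predM; rw [if_pos hs]
      have hproj : projK d x = (PySem.Str.len x, true, d.getD x "") := by
        unfold projK; rw [hs]
      rw [hfx]
      simp only [bBest, bestK, hguard, hcond]
      rw [← ih]
      congr 1
      exact upd_map d (predM ws i word) x b _ hproj
    · have hfx : bParse (x, d.getD x "") = (PySem.Str.len x, false, x, "", d.getD x "") := by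
        unfold bParse; rw [if_neg hs]
      have hcond : PySem.Str.isIn x word = predM ws i word x := by
        unfold predM; rw [if_neg hs]
      have hproj : projK d x = (PySem.Str.len x, false, d.getD x "") := by
        unfold projK
        rw [(by simpa using hs : PySem.Str.isIn " " x = false)]
      rw [hfx]
      simp only [bBest, bestK, hguard, hcond, Bool.false_eq_true, if_false]
      rw [← ih]
      congr 1
      exact upd_map d (predM ws i word) x b _ hproj

theorem bestK_pred (p : String → Bool) (xs : List String) (b : Option String)
    (hb : ∀ y, b = some y → p y = true) (m : String) (hm : bestK p xs b = some m) :
    p m = true := by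
  induction xs generalizing b with
  | nil => exact hb m hm
  | cons x rest ih =>
    refine ih (updK p b x) ?_ hm
    intro y hy
    cases b with
    | none =>
      rw [updK_none] at hy
      by_cases hpx : p x = true
      · simp only [hpx, if_true, Option.some.injEq] at hy
        subst hy
        exact hpx
      · simp [hpx] at hy
    | some m =>
      rw [updK_some] at hy
      cases hL : decide (PySem.Str.len m < PySem.Str.len x) with
      | false =>
        rw [hL] at hy
        simp only [Bool.false_eq_true, if_false] at hy
        exact hb y hy
      | true =>
        rw [hL] at hy
        rw [if_pos rfl] at hy
        by_cases hpx : p x = true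
        · rw [if_pos hpx, Option.some.injEq] at hy
          subst hy
          exact hpx
        · rw [if_neg hpx] at hy
          exact hb y hy

theorem wordLoop_eq (d : PySem.Dict String String) (ws : List String)
    (hnd : d.keys.Nodup) (fuel : Nat) :
    ∀ i : Nat, ws.length - i ≤ fuel →
    aWordLoop d ws (PySem.List.sorted d.keys (fun x => PySem.Str.len x) true)
        (PySem.List.enumerate (ws.drop i) (i : Int)) false
      = bWordLoop (d.items.map bParse) ws i := by
  have hitems : d.items.map bParse = d.keys.map (fun k => bParse (k, d.getD k "")) := by
    rw [PySem.Dict.items_eq_map_keys d hnd "", List.map_map]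
    rfl
  induction fuel with
  | zero =>
    intro i hf
    have hge : ws.length ≤ i := by omega
    rw [List.drop_eq_nil_of_le hge, bWordLoop, dif_neg (by omega)]
    rfl
  | succ fuel ih =>
    intro i hf
    by_cases h : i < ws.length
    · have hdrop : ws.drop i = ws[i] :: ws.drop (i + 1) := List.drop_eq_getElem_cons h
      rw [hdrop, PySem.List.enumerate_cons]
      simp only [aWordLoop, Bool.false_eq_true, if_false]
      rw [aEntryLoop_eq, find?_sorted_rev]
      rw [bWordLoop, dif_pos h]
      rw [hitems]
      have hb := bBest_eq d ws (i : Int) ws[i] d.keys none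
      rw [show (Option.map (projK d) (none : Option String)) = none from rfl] at hb
      rw [hb]
      cases hbest : bestK (predM ws (i : Int) ws[i]) d.keys none with
      | none =>
        simp only [Option.map_none, renderA]
        have hcast : ((i : Int) + 1) = ((i + 1 : Nat) : Int) := by push_cast; ring
        rw [hcast, ih (i + 1) (by omega)]
        simp only [hitems, List.singleton_append]
      | some e =>
        have hpe : predM ws (i : Int) ws[i] e = true :=
          bestK_pred _ _ _ (by intro y hy; simp at hy) e hbest
        by_cases hse : PySem.Str.isIn " " e = true
        · have hpe' := hpe
          unfold predM at hpe'
          rw [if_pos hse] at hpe'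
          simp only [Bool.and_eq_true, decide_eq_true_eq] at hpe'
          have hlt : i + 1 < ws.length := by
            have h1 := hpe'.1.1
            omega
          have hpj : projK d e = (PySem.Str.len e, true, d.getD e "") := by
            unfold projK; rw [hse]
          simp only [Option.map_some, hpj, renderA, hse]
          have hdrop2 : ws.drop (i + 1) = ws[i + 1] :: ws.drop (i + 2) := by
            exact List.drop_eq_getElem_cons hlt
          rw [hdrop2, PySem.List.enumerate_cons]
          simp only [aWordLoop]
          have hcast2 : (((i : Int) + 1) + 1) = ((i + 2 : Nat) : Int) := by push_cast; ring
          rw [hcast2, ih (i + 2) (by omega)]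
          simp only [hitems, if_true, List.cons_append, List.nil_append]
        · have hpj : projK d e = (PySem.Str.len e, false, d.getD e "") := by
            unfold projK
            rw [(by simpa using hse : PySem.Str.isIn " " e = false)]
          simp only [Option.map_some, hpj, renderA, hse, Bool.false_eq_true, if_false]
          have hcast : ((i : Int) + 1) = ((i + 1 : Nat) : Int) := by push_cast; ring
          rw [hcast, ih (i + 1) (by omega)]
          simp only [hitems, List.cons_append, List.nil_append]
    · have hge : ws.length ≤ i := by omega
      rw [List.drop_eq_nil_of_le hge, bWordLoop, dif_neg h]
      rfl

-- ===== VERDICT (by name: the statement is the Claim_ definition above) =====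
theorem match_category_to_sentences_spec : Claim_equal_match_category_to_sentences := by
  intro sentences category _
  unfold Spec_match_category_to_sentences
  unfold match_category_to_sentences match_category_to_sentences_alt
  simp only
  apply List.map_congr_left
  intro s _
  have := wordLoop_eq (PySem.Dict.ofList category) ((PySem.Str.split? s " ").getD [])
    (PySem.Dict.nodup_keys_ofList category) ((PySem.Str.split? s " ").getD []).length 0
    (by omega)
  simpa using this
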